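-- pv_equiv track=rewrite | github.com/salvadorblasco/apes | src/libaux.py | combine_components
-- ===== SOURCE A (Python) =====
-- def combine_components(stoich, ref):
--     """Group components by kind.
--
--     Sometimes it is useful to group the compounds that share a particular
--     component. For example, all the compounds that differ in the degree of
--     protonation could be considered as one combined 'species'.
--
--     Arguments:
--         stoich (sequence): The stoichiometry array
--         ref (int): The reference component
--
--     Returns:
--         dict: The keys are tuples containing the indices of the components
--             that belong to that family. The values are the indices of the
--             equilibria that belong to that family.
--
--     >>> P = [[1,0,1], [1,0,2], [1,0,3], [1,0,4], [1,0,5], [1,0,6], [0,1,1],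
--     ...     [0,1,2], [0,1,3], [1,1,3], [1,1,4], [1,1,5], [1,1,6], [1,1,7],
--     ...     [0,0,-1]]
--     >>> ref = 2
--     >>> combs = combine_components(P, ref)
--     {(0,): [0, 1, 2, 3, 4, 5], (1,): [6, 7, 8], (0, 1): [9, 10, 11, 12, 13],
--     (): [14]}
--     """
--     retval = {}
--     for equil, row in enumerate(stoich):
--         key = tuple(comp_index
--                     for comp_index, comp_stoi in enumerate(row)
--                     if comp_stoi != 0 and comp_index != ref)
--         if key in retval:
--             retval[key].append(equil)
--         else:
--             retval[key] = [equil]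
--     return retval
-- ===== SOURCE B (Python) =====
-- def combine_components(stoich, ref):
--     keys = [tuple(i for i, v in enumerate(row) if v != 0 and i != ref)
--             for row in stoich]
--     return {k: [e for e, k2 in enumerate(keys) if k2 == k]
--             for k in dict.fromkeys(keys)}
-- ===== Notes on version B (the rewrite author's own statement) =====
-- stated objective: simpler
-- what changed: Replaces the single pass that mutates a dict (append-or-insert per row) with a two-phase decomposition: compute all keys once, then a dict comprehension mapping each first-occurrence-distinct key (dict.fromkeys) to the indices whose key equals it.
import Mathlib
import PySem

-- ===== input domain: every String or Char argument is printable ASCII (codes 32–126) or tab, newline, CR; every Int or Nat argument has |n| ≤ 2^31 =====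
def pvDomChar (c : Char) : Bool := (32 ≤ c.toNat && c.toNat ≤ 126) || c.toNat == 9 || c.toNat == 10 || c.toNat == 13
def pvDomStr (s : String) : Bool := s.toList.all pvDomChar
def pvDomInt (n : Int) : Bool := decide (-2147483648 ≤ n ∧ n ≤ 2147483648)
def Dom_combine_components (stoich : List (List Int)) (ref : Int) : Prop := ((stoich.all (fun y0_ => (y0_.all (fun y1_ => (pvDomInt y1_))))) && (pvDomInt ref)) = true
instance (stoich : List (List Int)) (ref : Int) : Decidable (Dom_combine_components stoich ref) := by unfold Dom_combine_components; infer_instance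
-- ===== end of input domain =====

-- B is simpler: instead of mutating a dict row by row, it computes all keys once, then maps each
-- first-occurrence-distinct key to the indices whose key equals it (same values, same order).

-- ===== PORT A =====
-- the key tuple: indices of nonzero components, excluding ref (shared by both Pythons verbatim)
def pvKey (ref : Int) (row : List Int) : List Int :=
  (PySem.List.enumerate row).filterMap
    (fun p => if p.2 ≠ 0 ∧ p.1 ≠ ref then some p.1 else none)

def combine_components (stoich : List (List Int)) (ref : Int) : List (List Int × List Int) :=
  ((PySem.List.enumerate stoich).foldl
    (fun d p =>
      let key := pvKey ref p.2
      if d.contains key then d.modify key [] (fun v => v ++ [p.1])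
      else d.insert key [p.1])
    PySem.Dict.empty).items

-- ===== PORT B =====
def combine_components_alt (stoich : List (List Int)) (ref : Int) : List (List Int × List Int) :=
  let keys := stoich.map (pvKey ref)
  (PySem.List.dedup keys).map (fun k =>
    (k, (PySem.List.enumerate keys).filterMap (fun p => if p.2 = k then some p.1 else none)))

-- ===== PRECONDITION & SPEC =====
def Spec_combine_components (stoich : List (List Int)) (ref : Int) (out : List (List Int × List Int)) : Prop := out = combine_components_alt stoich ref
instance (stoich : List (List Int)) (ref : Int) (out : List (List Int × List Int)) : Decidable (Spec_combine_components stoich ref out) := by unfold Spec_combine_components; infer_instance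

-- ===== CLAIM (what is proved, stated in full; the proofs are below) =====
def Claim_equal_combine_components : Prop := ∀ (stoich : List (List Int)) (ref : Int), Dom_combine_components stoich ref → Spec_combine_components stoich ref (combine_components stoich ref)

-- ===== LEMMAS AND PROOFS =====

-- A's if/else step is exactly a 'modify' with default []
theorem pv_step_eq (ref : Int) :
    (fun (d : PySem.Dict (List Int) (List Int)) (p : Int × List Int) =>
      let key := pvKey ref p.2
      if d.contains key then d.modify key [] (fun v => v ++ [p.1])
      else d.insert key [p.1])
    = (fun d p => d.modify (pvKey ref p.2) [] (fun v => v ++ [p.1])) := by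
  funext d p
  by_cases h : d.contains (pvKey ref p.2)
  · simp [h]
  · simp only [Bool.not_eq_true] at h
    simp [PySem.Dict.modify, PySem.Dict.getD_of_not_contains, h]

theorem pv_enum_map {α β : Type} (f : α → β) (xs : List α) (s : Int) :
    PySem.List.enumerate (xs.map f) s
      = (PySem.List.enumerate xs s).map (fun p => (p.1, f p.2)) := by
  induction xs generalizing s with
  | nil => simp [PySem.List.enumerate_nil]
  | cons x xs ih => simp [PySem.List.enumerate_cons, ih]

theorem pv_filter_map_eq_filterMap {α β : Type} (l : List α) (p : α → Bool) (f : α → β) :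
    (l.filter p).map f = l.filterMap (fun x => if p x then some (f x) else none) := by
  induction l with
  | nil => rfl
  | cons x xs ih => by_cases h : p x <;> simp [h, ih]

-- ===== VERDICT (by name: the statement is the Claim_ definition above) =====
theorem combine_components_spec : Claim_equal_combine_components := by
  intro stoich ref _
  unfold Spec_combine_components combine_components combine_components_alt
  rw [pv_step_eq]
  have hnd : ((PySem.List.enumerate stoich).foldl
      (fun d p => d.modify (pvKey ref p.2) [] (fun v => v ++ [p.1]))
      PySem.Dict.empty).keys.Nodup :=
    PySem.Dict.nodup_keys_foldl_modify_key _ (fun p : Int × List Int => pvKey ref p.2)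
      [] (fun _ p v => v ++ [p.1]) PySem.Dict.empty (by simp)
  rw [PySem.Dict.items_eq_map_keys _ hnd []]
  have hkeys : ((PySem.List.enumerate stoich).foldl
      (fun d p => d.modify (pvKey ref p.2) [] (fun v => v ++ [p.1]))
      PySem.Dict.empty).keys = PySem.List.dedup (stoich.map (pvKey ref)) := by
    rw [PySem.Dict.keys_foldl_modify_key _ (fun p : Int × List Int => pvKey ref p.2)
      [] (fun _ p v => v ++ [p.1]) PySem.Dict.empty]
    have hm : (PySem.List.enumerate stoich).map (fun p => pvKey ref p.2)
        = stoich.map (pvKey ref) := by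
      rw [show (fun p : Int × List Int => pvKey ref p.2)
            = pvKey ref ∘ (fun x => x.2) from rfl,
        ← List.map_map, PySem.List.map_snd_enumerate]
    simp [hm, PySem.Set.update, PySem.Set.ofList, PySem.Dict.keys_empty]
  rw [hkeys]
  refine List.map_congr_left (fun k _ => ?_)
  have hfold : (PySem.List.enumerate stoich).foldl
      (fun d p => d.modify (pvKey ref p.2) [] (fun v => v ++ [p.1])) PySem.Dict.empty
      = (((PySem.List.enumerate stoich).map (fun p => (pvKey ref p.2, p.1))).foldl
          (fun d q => d.modify q.1 [] (fun v => v ++ [q.2])) PySem.Dict.empty) := by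
    rw [List.foldl_map]
  rw [hfold, Prod.mk.injEq]
  refine ⟨rfl, ?_⟩
  rw [PySem.Dict.getD_foldl_modify_append]
  rw [pv_enum_map, List.filterMap_map, List.filter_map, List.map_map,
    pv_filter_map_eq_filterMap]
  simp
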